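-- pv_equiv track=rewrite | github.com/rayyansys/pyworker | pyworker/util.py | squash_multiline_yaml
-- ===== SOURCE A (Python) =====
-- def squash_multiline_yaml(lines):
--     """
--     Given a list of YAML lines, squash lines with unclosed quotes (single or double)
--     into a single line until the quote closes.
--     Handles values that contain ':' safely.
--     """
--     squashed = []
--     buffer = None
--     quote_char = None
--
--     for line in lines:
--         stripped = line.strip()
--
--         if buffer is None:
--             if ":" in line:
--                 # split only once (key : value)
--                 key, val = line.split(":", 1)
--                 val = val.lstrip()
--
--                 # quoted start but not closed
--                 if val.startswith("'") and not (len(val) > 1 and val.endswith("'")):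
--                     buffer = line.rstrip("\n")
--                     quote_char = "'"
--                     continue
--                 elif val.startswith('"') and not (len(val) > 1 and val.endswith('"')):
--                     buffer = line.rstrip("\n")
--                     quote_char = '"'
--                     continue
--
--             squashed.append(line)
--
--         else:
--             # still accumulating
--             buffer += "\\n" + line.strip("\n")
--
--             # closing quote?
--             if line.strip().endswith(quote_char):
--                 squashed.append(buffer)
--                 buffer = None
--                 quote_char = None
--
--     # in case YAML was malformed and never closed
--     if buffer is not None:
--         squashed.append(buffer)
--
--     return squashed
-- ===== SOURCE B (Python) =====
-- def squash_multiline_yaml(lines):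
--     def opening_quote(line):
--         # quote char that this line opens without closing, else None
--         if ":" not in line:
--             return None
--         val = line.split(":", 1)[1].lstrip()
--         for q in ("'", '"'):
--             if val.startswith(q) and not (len(val) > 1 and val.endswith(q)):
--                 return q
--         return None
--
--     out = []
--     i = 0
--     n = len(lines)
--     while i < n:
--         q = opening_quote(lines[i])
--         if q is None:
--             out.append(lines[i])
--             i += 1
--             continue
--         j = i + 1
--         while j < n and not lines[j].strip().endswith(q):
--             j += 1
--         chunk = [lines[i].rstrip("\n")] + [l.strip("\n") for l in lines[i + 1:j + 1]]
--         out.append("\\n".join(chunk))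
--         i = j + 1
--     return out
-- ===== Notes on version B (the rewrite author's own statement) =====
-- stated objective: alternative
-- what changed: Replaces A's single-pass state machine (persistent buffer/quote_char accumulator mutated across iterations) with an index-based outer scan that, on seeing an opening line, runs an inner scan to the closing line and builds the squashed line by slicing and joining that block at once.
import Mathlib
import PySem

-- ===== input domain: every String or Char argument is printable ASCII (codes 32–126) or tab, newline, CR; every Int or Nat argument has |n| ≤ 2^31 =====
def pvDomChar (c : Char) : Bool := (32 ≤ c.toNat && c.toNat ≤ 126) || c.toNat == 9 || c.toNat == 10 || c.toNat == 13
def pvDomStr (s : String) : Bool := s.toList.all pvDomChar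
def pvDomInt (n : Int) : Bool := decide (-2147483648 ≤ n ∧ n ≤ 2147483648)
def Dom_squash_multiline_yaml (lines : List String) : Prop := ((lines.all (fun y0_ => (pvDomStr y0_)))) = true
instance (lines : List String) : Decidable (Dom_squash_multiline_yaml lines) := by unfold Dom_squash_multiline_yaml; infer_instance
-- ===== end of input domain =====

-- B replaces A's persistent buffer/quote_char state machine by an outer scan with an
-- inner scan to the closing line, building each squashed line by slicing and joining
-- the whole block at once (objective: alternative decomposition, same cost).

-- s.strip("\n") — exact hand port (PySem has no per-side strip-with-chars)
def pvStripNl (s : String) : String :=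
  String.ofList ((((s.toList.dropWhile (· == '\n')).reverse.dropWhile (· == '\n')).reverse))
-- s.rstrip("\n") — exact hand port
def pvRstripNl (s : String) : String :=
  String.ofList ((s.toList.reverse.dropWhile (· == '\n')).reverse)

-- ===== PORT A =====
-- the for loop over `lines` as the obvious structural recursion carrying
-- (squashed, buffer, quote_char); quote_char = None is ported as "" (never read while buffer is none)
def pvALoop (lines : List String) (squashed : List String)
    (buffer : Option String) (quote : String) : List String :=
  match lines with
  | [] =>
    match buffer with          -- the post-loop flush of a never-closed buffer
    | none => squashed
    | some b => squashed ++ [b]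
  | line :: rest =>
    match buffer with
    | none =>
      if PySem.Str.isIn ":" line then
        let val := PySem.Str.lstrip (((PySem.Str.splitMax? line ":" 1).getD []).getD 1 "")
        if PySem.Str.startswith val "'" && !((1 : Int) < PySem.Str.len val && PySem.Str.endswith val "'") then
          pvALoop rest squashed (some (pvRstripNl line)) "'"
        else if PySem.Str.startswith val "\"" && !((1 : Int) < PySem.Str.len val && PySem.Str.endswith val "\"") then
          pvALoop rest squashed (some (pvRstripNl line)) "\""
        else
          pvALoop rest (squashed ++ [line]) none quote
      else
        pvALoop rest (squashed ++ [line]) none quote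
    | some buf =>
      -- buffer += "\\n" + line.strip("\n")  (string concatenation at the char-list level, exact)
      let buf2 := String.ofList (buf.toList ++ "\\n".toList ++ (pvStripNl line).toList)
      if PySem.Str.endswith (PySem.Str.strip line) quote then
        pvALoop rest (squashed ++ [buf2]) none ""
      else
        pvALoop rest squashed (some buf2) quote

def squash_multiline_yaml (lines : List String) : List String :=
  pvALoop lines [] none ""

-- ===== PORT B =====
-- opening_quote(line): the quote char this line opens without closing, else None
def pvOpenQuote (line : String) : Option String :=
  if PySem.Str.isIn ":" line then
    let val := PySem.Str.lstrip (((PySem.Str.splitMax? line ":" 1).getD []).getD 1 "")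
    ["'", "\""].findSome? (fun q =>
      if PySem.Str.startswith val q && !((1 : Int) < PySem.Str.len val && PySem.Str.endswith val q) then some q else none)
  else none

-- the inner while loop: (lines[i+1:j+1], lines[j+1:]) — block up to and including the
-- closing line, and the remainder
def pvScanClose (q : String) : List String → List String × List String
  | [] => ([], [])
  | l :: rest =>
    if PySem.Str.endswith (PySem.Str.strip l) q then ([l], rest)
    else
      let p := pvScanClose q rest
      (l :: p.1, p.2)

theorem pvScanClose_snd_len (q : String) (ls : List String) :
    (pvScanClose q ls).2.length ≤ ls.length := by
  induction ls with
  | nil => simp [pvScanClose]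
  | cons l rest ih =>
    simp only [pvScanClose]
    split
    · simp
    · simpa using Nat.le_succ_of_le ih

def squash_multiline_yaml_alt (lines : List String) : List String :=
  match lines with
  | [] => []
  | line :: rest =>
    match pvOpenQuote line with
    | none => line :: squash_multiline_yaml_alt rest
    | some q =>
      let p := pvScanClose q rest
      PySem.Str.join "\\n" (pvRstripNl line :: p.1.map pvStripNl) :: squash_multiline_yaml_alt p.2
  termination_by lines.length
  decreasing_by
  · simp
  · have := pvScanClose_snd_len q rest
    simp; omega

-- ===== PRECONDITION & SPEC =====
def Spec_squash_multiline_yaml (lines : List String) (out : List String) : Prop := out = squash_multiline_yaml_alt lines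
instance (lines : List String) (out : List String) : Decidable (Spec_squash_multiline_yaml lines out) := by unfold Spec_squash_multiline_yaml; infer_instance

-- ===== CLAIM (what is proved, stated in full; the proofs are below) =====
def Claim_equal_squash_multiline_yaml : Prop := ∀ (lines : List String), Dom_squash_multiline_yaml lines → Spec_squash_multiline_yaml lines (squash_multiline_yaml lines)

-- ===== LEMMAS AND PROOFS =====

-- A's opening test, branch for branch, equals B's opening_quote helper
theorem pvAstep_none (l : String) (rest sq : List String) (q : String) :
    pvALoop (l :: rest) sq none q =
      match pvOpenQuote l with
      | some qc => pvALoop rest sq (some (pvRstripNl l)) qc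
      | none => pvALoop rest (sq ++ [l]) none q := by
  rw [pvALoop.eq_def, pvOpenQuote]
  dsimp only [List.findSome?]
  split_ifs <;> rfl

theorem pvCharsJoin_flat (sep : List Char) (a : List Char) (rest : List (List Char)) :
    PySem.Chars.join sep (a :: rest) = a ++ rest.flatMap (fun x => sep ++ x) := by
  induction rest generalizing a with
  | nil => simp [PySem.Chars.join, List.intercalate]
  | cons b bs ih => rw [PySem.Chars.join_cons_cons, ih b]; simp

set_option maxHeartbeats 2000000 in
theorem pvMain : ∀ (n : Nat) (ls : List String), ls.length ≤ n →
    (∀ (sq : List String) (q : String),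
        pvALoop ls sq none q = sq ++ squash_multiline_yaml_alt ls) ∧
    (∀ (sq : List String) (buf q : String),
        pvALoop ls sq (some buf) q =
          sq ++ [String.ofList (buf.toList ++
            ((pvScanClose q ls).1.map pvStripNl).flatMap (fun s => "\\n".toList ++ s.toList))]
             ++ squash_multiline_yaml_alt (pvScanClose q ls).2) := by
  intro n
  induction n with
  | zero =>
    intro ls hls
    have : ls = [] := List.eq_nil_of_length_eq_zero (Nat.le_zero.mp hls)
    subst this
    refine ⟨fun sq q => by simp [pvALoop, squash_multiline_yaml_alt],
            fun sq buf q => by simp [pvALoop, pvScanClose, squash_multiline_yaml_alt,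
                                     String.ofList_toList]⟩
  | succ n ih =>
    intro ls hls
    match ls with
    | [] =>
      refine ⟨fun sq q => by simp [pvALoop, squash_multiline_yaml_alt],
              fun sq buf q => by simp [pvALoop, pvScanClose, squash_multiline_yaml_alt,
                                       String.ofList_toList]⟩
    | l :: rest =>
      have hr : rest.length ≤ n := by simpa using Nat.succ_le_succ_iff.mp hls
      constructor
      · intro sq q
        rw [pvAstep_none]
        cases hoq : pvOpenQuote l with
        | none =>
          dsimp only
          rw [(ih rest hr).1 (sq ++ [l]) q]
          conv_rhs => rw [squash_multiline_yaml_alt.eq_def]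
          simp [hoq]
        | some qc =>
          dsimp only
          rw [(ih rest hr).2 sq (pvRstripNl l) qc]
          conv_rhs => rw [squash_multiline_yaml_alt.eq_def]
          simp only [hoq]
          have hj : PySem.Str.join "\\n" (pvRstripNl l :: (pvScanClose qc rest).1.map pvStripNl) =
              String.ofList ((pvRstripNl l).toList ++
                ((pvScanClose qc rest).1.map pvStripNl).flatMap (fun s => "\\n".toList ++ s.toList)) :=
            String.ext (by simp [pvCharsJoin_flat, List.flatMap_map])
          rw [hj, List.append_assoc, List.singleton_append]
      · intro sq buf q
        rw [pvALoop.eq_def]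
        by_cases hc : PySem.Str.endswith (PySem.Str.strip l) q = true
        · have hsc : pvScanClose q (l :: rest) = ([l], rest) := by
            simp only [pvScanClose]; rw [if_pos hc]
          simp only [hc, if_true]
          rw [(ih rest hr).1, hsc]
          simp [List.append_assoc]
        · have hc' : PySem.Str.endswith (PySem.Str.strip l) q = false := by
            simpa using hc
          have hsc : pvScanClose q (l :: rest) =
              (l :: (pvScanClose q rest).1, (pvScanClose q rest).2) := by
            simp only [pvScanClose]; rw [if_neg hc]
          simp only [hc', Bool.false_eq_true, if_false]
          rw [(ih rest hr).2, hsc]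
          simp [List.append_assoc]

-- ===== VERDICT (by name: the statement is the Claim_ definition above) =====
theorem squash_multiline_yaml_spec : Claim_equal_squash_multiline_yaml := by
  intro lines _
  unfold Spec_squash_multiline_yaml squash_multiline_yaml
  simpa using (pvMain lines.length lines le_rfl).1 [] ""
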